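-- pv_equiv track=rewrite | github.com/qequ/retruco | src/syntax_checker.py | checker_O2
-- ===== SOURCE A (Python) =====
-- def checker_O2(opcodes_list):
--     """
--     given a list of opcodes checks that the
--     """
--     filtered_l = list(filter(lambda s: any(s.startswith(x)
--                       for x in "34578"), opcodes_list))
--     format_l = list(map(lambda s: s[0], filtered_l))
--     correct_indexes = []
--
--     for i in range(len(format_l)):
--
--         if format_l[i] == "3":
--             found_else = False
--             found_endif = False
--             indent_level = 0
--
--             for j in range(i+1, len(format_l)):
--                 if format_l[j] == "3":
--                     indent_level += 1
--                 elif format_l[j] == "4" and indent_level == 0: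
--                     # its his else
--                     found_else = True
--                     correct_indexes.append(j)
--                 elif format_l[j] == "5":
--                     if indent_level == 0:
--                         # its his endif
--                         if not found_else:
--                             return False
--                         found_endif = True
--                         correct_indexes.append(j)
--                         break
--                     else:
--                         indent_level -= 1
--
--             if not found_else or not found_endif:
--                 return False
--
--         elif format_l[i] == "7":
--             indent_level = 0
--             found_endwhile = False
--
--             for j in range(i+1, len(format_l)):
--                 if format_l[j] == "7":
--                     indent_level += 1
--                 elif format_l[j] == "8":
--                     if indent_level == 0:
--                         found_endwhile = True
--                         correct_indexes.append(j)
--                         break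
--                     else:
--                         indent_level -= 1
--
--             if not found_endwhile:
--                 return False
--
--         else:
--             if not i in correct_indexes:
--                 return False
--
--     return True
-- ===== SOURCE B (Python) =====
-- def checker_O2(opcodes_list):
--     # Single pass: a stack of else-seen flags for if/else/endif, a counter for while/endwhile.
--     if_stack = []
--     while_open = 0
--     for op in opcodes_list:
--         c = op[:1]
--         if c == "3":
--             if_stack.append(False)
--         elif c == "4":
--             if not if_stack:
--                 return False
--             if_stack[-1] = True
--         elif c == "5":
--             if not if_stack or not if_stack[-1]:
--                 return False
--             if_stack.pop()
--         elif c == "7":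
--             while_open += 1
--         elif c == "8":
--             if while_open == 0:
--                 return False
--             while_open -= 1
--     return not if_stack and while_open == 0
-- ===== Notes on version B (the rewrite author's own statement) =====
-- stated objective: faster
-- what changed: Replaced A's per-opener quadratic forward scans (each if/while rescans the rest of the list for its else/endif/endwhile and records indices) by a single left-to-right pass keeping a stack of else-seen flags for if-frames and a counter of open whiles.
import Mathlib
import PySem

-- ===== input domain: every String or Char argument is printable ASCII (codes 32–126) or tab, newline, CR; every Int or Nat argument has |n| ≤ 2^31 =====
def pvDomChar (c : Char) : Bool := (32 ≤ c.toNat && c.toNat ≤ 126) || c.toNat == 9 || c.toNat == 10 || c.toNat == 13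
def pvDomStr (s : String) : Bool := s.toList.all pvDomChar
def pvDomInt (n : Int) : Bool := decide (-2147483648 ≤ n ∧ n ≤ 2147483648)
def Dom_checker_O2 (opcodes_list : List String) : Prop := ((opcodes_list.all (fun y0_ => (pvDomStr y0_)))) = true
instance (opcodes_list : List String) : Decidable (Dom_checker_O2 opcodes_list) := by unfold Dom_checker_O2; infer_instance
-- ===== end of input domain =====

-- B replaces A's quadratic per-opener forward scans by one left-to-right pass keeping a
-- stack of else-seen flags for if/else/endif and a counter for while/endwhile (objective: faster).

-- ===== PORT A =====
-- enumerate with a starting offset: 'for i in range(len(format_l))' reading format_l[i]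
def pvEnumFrom (k : Nat) : List Char → List (Nat × Char)
  | [] => []
  | c :: t => (k, c) :: pvEnumFrom (k + 1) t

-- filtered_l / format_l: keep opcodes whose first char is one of "34578", take s[0]
-- (the filter guarantees s is nonempty, so the `.getD ' '` default of s[0] is never used)
def pvFormatA (l : List String) : List Char :=
  (l.filter (fun s => ("34578".toList.any (fun x => PySem.Str.startswith s (String.ofList [x]))))).map
    (fun s => (PySem.Str.pyGet? s 0).getD ' ')

-- inner loop of the "3" branch; `none` = the `return False` at an else-less endif
def pvIfScanA : List (Nat × Char) → Bool → Bool → Int → List Nat → Option (Bool × Bool × List Nat)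
  | [], fe, fend, _, C => some (fe, fend, C)
  | (j, c) :: t, fe, fend, ind, C =>
    if c = '3' then pvIfScanA t fe fend (ind + 1) C
    else if c = '4' ∧ ind = 0 then pvIfScanA t true fend ind (C ++ [j])
    else if c = '5' then
      if ind = 0 then (if fe = false then none else some (fe, true, C ++ [j]))
      else pvIfScanA t fe fend (ind - 1) C
    else pvIfScanA t fe fend ind C

-- inner loop of the "7" branch
def pvWhileScanA : List (Nat × Char) → Int → Bool → List Nat → Bool × List Nat
  | [], _, fw, C => (fw, C)
  | (j, c) :: t, ind, fw, C =>
    if c = '7' then pvWhileScanA t (ind + 1) fw C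
    else if c = '8' then
      (if ind = 0 then (true, C ++ [j]) else pvWhileScanA t (ind - 1) fw C)
    else pvWhileScanA t ind fw C

-- outer loop over i, carrying correct_indexes
def pvOuterA : List (Nat × Char) → List Nat → Bool
  | [], _ => true
  | (i, c) :: t, C =>
    if c = '3' then
      match pvIfScanA t false false 0 C with
      | none => false
      | some (fe, fend, C') => if fe = false ∨ fend = false then false else pvOuterA t C'
    else if c = '7' then
      match pvWhileScanA t 0 false C with
      | (fw, C') => if fw = false then false else pvOuterA t C'
    else if i ∈ C then pvOuterA t C else false

def checker_O2 (opcodes_list : List String) : Bool :=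
  pvOuterA (pvEnumFrom 0 (pvFormatA opcodes_list)) []

-- ===== PORT B =====
-- one pass; if_stack is the list of else-seen flags (top at head), while_open the counter
def pvRunB : List String → List Bool → Int → Bool
  | [], st, w => st.isEmpty && w == 0
  | op :: t, st, w =>
    let c := PySem.Str.slice op none (some 1)   -- op[:1]
    if c = "3" then pvRunB t (false :: st) w
    else if c = "4" then
      match st with
      | [] => false
      | _ :: r => pvRunB t (true :: r) w
    else if c = "5" then
      match st with
      | [] => false
      | b :: r => if b = false then false else pvRunB t r w
    else if c = "7" then pvRunB t st (w + 1)
    else if c = "8" then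
      (if w == 0 then false else pvRunB t st (w - 1))
    else pvRunB t st w

def checker_O2_alt (opcodes_list : List String) : Bool :=
  pvRunB opcodes_list [] 0

-- ===== PRECONDITION & SPEC =====
def Spec_checker_O2 (opcodes_list : List String) (out : Bool) : Prop := out = checker_O2_alt opcodes_list
instance (opcodes_list : List String) (out : Bool) : Decidable (Spec_checker_O2 opcodes_list out) := by unfold Spec_checker_O2; infer_instance

-- ===== CLAIM (what is proved, stated in full; the proofs are below) =====
def Claim_equal_checker_O2 : Prop := ∀ (opcodes_list : List String), Dom_checker_O2 opcodes_list → Spec_checker_O2 opcodes_list (checker_O2 opcodes_list)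

-- ===== LEMMAS AND PROOFS =====

-- the five significant opcode heads
def pvOps : List Char := ['3', '4', '5', '7', '8']

-- machine over format chars: the if/else/endif component of B's pass
def pvRunI : List Char → List Bool → Bool
  | [], st => st.isEmpty
  | c :: t, st =>
    if c = '3' then pvRunI t (false :: st)
    else if c = '4' then (match st with | [] => false | _ :: r => pvRunI t (true :: r))
    else if c = '5' then (match st with | [] => false | b :: r => if b = false then false else pvRunI t r)
    else pvRunI t st

-- machine over format chars: the while/endwhile component of B's pass
def pvRunW : List Char → Nat → Bool
  | [], w => w == 0
  | c :: t, w =>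
    if c = '7' then pvRunW t (w + 1)
    else if c = '8' then (match w with | 0 => false | v + 1 => pvRunW t v)
    else pvRunW t w

def pvSh (p : List Nat × Option Nat) : List Nat × Option Nat := (p.1.map (· + 1), p.2.map (· + 1))

-- pure description of A's if-scan: (positions of depth-0 '4's before the stop, first depth-0 '5')
def pvScan35 : List Char → Int → List Nat × Option Nat
  | [], _ => ([], none)
  | c :: t, d =>
    if c = '3' then pvSh (pvScan35 t (d + 1))
    else if c = '4' ∧ d = 0 then (0 :: (pvScan35 t d).1.map (· + 1), (pvScan35 t d).2.map (· + 1))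
    else if c = '5' then
      (if d = 0 then (([] : List Nat), some 0) else pvSh (pvScan35 t (d - 1)))
    else pvSh (pvScan35 t d)

-- pure description of A's while-scan: first depth-0 '8'
def pvScan78 : List Char → Int → Option Nat
  | [], _ => none
  | c :: t, d =>
    if c = '7' then (pvScan78 t (d + 1)).map (· + 1)
    else if c = '8' then
      (if d = 0 then some 0 else (pvScan78 t (d - 1)).map (· + 1))
    else (pvScan78 t d).map (· + 1)

-- positions that close/else one of m open if-frames
def pvClosI : List Char → Nat → List Nat
  | _, 0 => []
  | f, m + 1 =>
    match pvScan35 f 0 with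
    | (E, some j) => E ++ j :: (pvClosI (f.drop (j + 1)) m).map (· + (j + 1))
    | (E, none) => E

-- positions that close one of w open whiles
def pvClosW : List Char → Nat → List Nat
  | _, 0 => []
  | f, w + 1 =>
    match pvScan78 f 0 with
    | some j => j :: (pvClosW (f.drop (j + 1)) w).map (· + (j + 1))
    | none => []

-- every open if-frame is closed, with an else before its endif when its flag is still false
def pvReqI : List Char → List Bool → Prop
  | _, [] => True
  | f, b :: fl =>
    match pvScan35 f 0 with
    | (E, some j) => (b = true ∨ E ≠ []) ∧ pvReqI (f.drop (j + 1)) fl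
    | (_, none) => False

-- every open while is closed
def pvReqW : List Char → Nat → Prop
  | _, 0 => True
  | f, w + 1 =>
    match pvScan78 f 0 with
    | some j => pvReqW (f.drop (j + 1)) w
    | none => False


-- ---- unfold lemmas for the pure scans ----
theorem pvScan35_cons3 (t : List Char) (d : Int) : pvScan35 ('3' :: t) d = pvSh (pvScan35 t (d + 1)) := by
  simp [pvScan35]

theorem pvScan35_cons4_zero (t : List Char) :
    pvScan35 ('4' :: t) 0 = (0 :: (pvScan35 t 0).1.map (· + 1), (pvScan35 t 0).2.map (· + 1)) := by
  simp [pvScan35]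

theorem pvScan35_cons5_zero (t : List Char) : pvScan35 ('5' :: t) 0 = ([], some 0) := by
  simp [pvScan35]

theorem pvScan35_cons5_ne (t : List Char) (d : Int) (hd : d ≠ 0) :
    pvScan35 ('5' :: t) d = pvSh (pvScan35 t (d - 1)) := by
  simp [pvScan35, hd]

theorem pvScan35_cons_skip (c : Char) (t : List Char) (d : Int)
    (h3 : c ≠ '3') (h5 : c ≠ '5') (h4 : ¬(c = '4' ∧ d = 0)) :
    pvScan35 (c :: t) d = pvSh (pvScan35 t d) := by
  simp only [pvScan35, if_neg h3, if_neg h4, if_neg h5]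

theorem pvScan78_cons7 (t : List Char) (d : Int) :
    pvScan78 ('7' :: t) d = (pvScan78 t (d + 1)).map (· + 1) := by
  simp [pvScan78]

theorem pvScan78_cons8_zero (t : List Char) : pvScan78 ('8' :: t) 0 = some 0 := by
  simp [pvScan78]

theorem pvScan78_cons8_ne (t : List Char) (d : Int) (hd : d ≠ 0) :
    pvScan78 ('8' :: t) d = (pvScan78 t (d - 1)).map (· + 1) := by
  simp [pvScan78, hd]

theorem pvScan78_cons_skip (c : Char) (t : List Char) (d : Int) (h7 : c ≠ '7') (h8 : c ≠ '8') :
    pvScan78 (c :: t) d = (pvScan78 t d).map (· + 1) := by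
  simp [pvScan78, h7, h8]

-- ---- shift lemmas: scanning at depth d+1 skips the group closed by the depth-d stop ----
theorem pvScan35_succ : ∀ (t : List Char) (d : Int), 0 ≤ d →
    pvScan35 t (d + 1) =
      match (pvScan35 t d).2 with
      | some j => ((pvScan35 (t.drop (j + 1)) 0).1.map (· + (j + 1)),
                   (pvScan35 (t.drop (j + 1)) 0).2.map (· + (j + 1)))
      | none => ([], none)
  | [], d, _ => by simp [pvScan35]
  | c :: t, d, hd => by
    have ih := fun (d' : Int) (h : 0 ≤ d') => pvScan35_succ t d' h
    by_cases h3 : c = '3'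
    · subst h3
      rw [pvScan35_cons3, pvScan35_cons3]
      cases h : (pvScan35 t (d + 1)).2 with
      | none =>
        have e := ih (d + 1) (by omega); rw [h] at e
        rw [e]; simp [pvSh, h]
      | some j1 =>
        have e := ih (d + 1) (by omega); rw [h] at e
        rw [e]
        simp [pvSh, h, List.map_map, Option.map_map, Function.comp_def, Nat.add_assoc,
          List.drop_succ_cons]
    · by_cases h5 : c = '5'
      · subst h5
        by_cases hd0 : d = 0
        · subst hd0
          rw [show (0 : Int) + 1 = 1 by norm_num, pvScan35_cons5_zero,
              pvScan35_cons5_ne t 1 (by omega)]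
          simp [pvSh]
        · rw [pvScan35_cons5_ne t d hd0, pvScan35_cons5_ne t (d + 1) (by omega),
              show d + 1 - 1 = (d - 1) + 1 by omega]
          cases h : (pvScan35 t (d - 1)).2 with
          | none =>
            have e := ih (d - 1) (by omega); rw [h] at e
            rw [e]; simp [pvSh, h]
          | some j1 =>
            have e := ih (d - 1) (by omega); rw [h] at e
            rw [e]
            simp [pvSh, h, List.map_map, Option.map_map, Function.comp_def, Nat.add_assoc,
              List.drop_succ_cons]
      · by_cases h4 : c = '4' ∧ d = 0
        · obtain ⟨h4c, h4d⟩ := h4; subst h4c; subst h4d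
          rw [pvScan35_cons4_zero, show (0 : Int) + 1 = 1 by norm_num,
              pvScan35_cons_skip '4' t 1 (by decide) (by decide) (by intro hx; exact absurd hx.2 (by norm_num))]
          cases h : (pvScan35 t 0).2 with
          | none =>
            have e := ih 0 (by omega)
            rw [show (0 : Int) + 1 = 1 by norm_num] at e
            rw [h] at e
            rw [e]; simp [pvSh, h]
          | some j1 =>
            have e := ih 0 (by omega)
            rw [show (0 : Int) + 1 = 1 by norm_num] at e
            rw [h] at e
            rw [e]
            simp [pvSh, h, List.map_map, Option.map_map, Function.comp_def, Nat.add_assoc,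
              List.drop_succ_cons]
        · have h4c : c = '4' → d ≠ 0 := by intro hc; exact fun hd0 => h4 ⟨hc, hd0⟩
          rw [pvScan35_cons_skip c t d h3 h5 h4,
              pvScan35_cons_skip c t (d + 1) h3 h5 (by intro hx; omega)]
          cases h : (pvScan35 t d).2 with
          | none =>
            have e := ih d hd; rw [h] at e
            rw [e]; simp [pvSh, h]
          | some j1 =>
            have e := ih d hd; rw [h] at e
            rw [e]
            simp [pvSh, h, List.map_map, Option.map_map, Function.comp_def, Nat.add_assoc,
              List.drop_succ_cons]
  termination_by t => t.length

theorem pvScan78_succ : ∀ (t : List Char) (d : Int), 0 ≤ d →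
    pvScan78 t (d + 1) =
      match pvScan78 t d with
      | some j => (pvScan78 (t.drop (j + 1)) 0).map (· + (j + 1))
      | none => none
  | [], d, _ => by simp [pvScan78]
  | c :: t, d, hd => by
    have ih := fun (d' : Int) (h : 0 ≤ d') => pvScan78_succ t d' h
    by_cases h7 : c = '7'
    · subst h7
      rw [pvScan78_cons7, pvScan78_cons7]
      cases h : pvScan78 t (d + 1) with
      | none =>
        have e := ih (d + 1) (by omega); rw [h] at e
        rw [e]; simp [h]
      | some j1 =>
        have e := ih (d + 1) (by omega); rw [h] at e
        rw [e]
        simp [h, Option.map_map, Function.comp_def, Nat.add_assoc, List.drop_succ_cons]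
    · by_cases h8 : c = '8'
      · subst h8
        by_cases hd0 : d = 0
        · subst hd0
          rw [show (0 : Int) + 1 = 1 by norm_num, pvScan78_cons8_zero,
              pvScan78_cons8_ne t 1 (by omega)]
          simp
        · rw [pvScan78_cons8_ne t d hd0, pvScan78_cons8_ne t (d + 1) (by omega),
              show d + 1 - 1 = (d - 1) + 1 by omega]
          cases h : pvScan78 t (d - 1) with
          | none =>
            have e := ih (d - 1) (by omega); rw [h] at e
            rw [e]; simp [h]
          | some j1 =>
            have e := ih (d - 1) (by omega); rw [h] at e
            rw [e]
            simp [h, Option.map_map, Function.comp_def, Nat.add_assoc, List.drop_succ_cons]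
      · rw [pvScan78_cons_skip c t d h7 h8, pvScan78_cons_skip c t (d + 1) h7 h8]
        cases h : pvScan78 t d with
        | none =>
          have e := ih d hd; rw [h] at e
          rw [e]; simp [h]
        | some j1 =>
          have e := ih d hd; rw [h] at e
          rw [e]
          simp [h, Option.map_map, Function.comp_def, Nat.add_assoc, List.drop_succ_cons]
  termination_by t => t.length

-- ---- how closer sets and closedness requirements evolve per head character ----
theorem pvClosI_zero (f : List Char) : pvClosI f 0 = [] := rfl
theorem pvClosW_zero (f : List Char) : pvClosW f 0 = [] := rfl
theorem pvReqW_zero (f : List Char) : pvReqW f 0 := trivial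
theorem pvReqI_nil_iff (f : List Char) (fl : List Bool) : pvReqI f fl → (f = [] → fl = []) := by
  intro h hf; subst hf
  cases fl with
  | nil => rfl
  | cons b r => simp [pvReqI, pvScan35] at h

theorem pvScan35_head (t : List Char) (E : List Nat) (j : Nat)
    (h : pvScan35 t 0 = (E, some j)) :
    pvScan35 ('3' :: t) 0 = ((pvScan35 (t.drop (j + 1)) 0).1.map (· + (j + 2)),
      (pvScan35 (t.drop (j + 1)) 0).2.map (· + (j + 2))) := by
  have e := pvScan35_succ t 0 (le_refl 0)
  rw [h] at e
  rw [pvScan35_cons3, e]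
  simp [pvSh, List.map_map, Option.map_map, Function.comp_def, Nat.add_assoc]

theorem pvScan35_head_none (t : List Char) (E : List Nat)
    (h : pvScan35 t 0 = (E, none)) :
    pvScan35 ('3' :: t) 0 = ([], none) := by
  have e := pvScan35_succ t 0 (le_refl 0)
  rw [h] at e
  rw [pvScan35_cons3, e]
  simp [pvSh]

theorem pvScan78_head (t : List Char) (j : Nat) (h : pvScan78 t 0 = some j) :
    pvScan78 ('7' :: t) 0 = (pvScan78 (t.drop (j + 1)) 0).map (· + (j + 2)) := by
  have e := pvScan78_succ t 0 (le_refl 0)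
  rw [h] at e
  rw [pvScan78_cons7, e]
  simp [Option.map_map, Function.comp_def, Nat.add_assoc]

theorem pvScan78_head_none (t : List Char) (h : pvScan78 t 0 = none) :
    pvScan78 ('7' :: t) 0 = none := by
  have e := pvScan78_succ t 0 (le_refl 0)
  rw [h] at e
  rw [pvScan78_cons7, e]
  rfl

theorem pvClosI_cons3 (t : List Char) (E : List Nat) (j : Nat)
    (h : pvScan35 t 0 = (E, some j)) (m : Nat) :
    pvClosI ('3' :: t) m = (pvClosI (t.drop (j + 1)) m).map (· + (j + 2)) := by
  cases m with
  | zero => simp [pvClosI_zero]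
  | succ m =>
    rcases hS : pvScan35 (t.drop (j + 1)) 0 with ⟨E2, o2⟩
    have e3 := pvScan35_head t E j h
    rw [hS] at e3
    cases o2 with
    | none =>
      simp only [pvClosI, e3, hS, Option.map_none]
    | some j2 =>
      simp only [pvClosI, e3, hS, Option.map_some]
      simp [List.map_map, Function.comp_def, List.drop_drop, List.drop_succ_cons]
      rw [show j2 + (j + 2) = j + 1 + (j2 + 1) by omega]
      exact List.map_congr_left (fun a _ => by omega)

theorem pvClosI_cons4 (t : List Char) (m : Nat) :
    pvClosI ('4' :: t) (m + 1) = 0 :: (pvClosI t (m + 1)).map (· + 1) := by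
  rcases hS : pvScan35 t 0 with ⟨E2, o2⟩
  have e4 : pvScan35 ('4' :: t) 0 = (0 :: E2.map (· + 1), o2.map (· + 1)) := by
    rw [pvScan35_cons4_zero, hS]
  cases o2 with
  | none => simp only [pvClosI, e4, hS, Option.map_none]
  | some j2 =>
    simp only [pvClosI, e4, hS, Option.map_some]
    simp [List.map_map, Function.comp_def, List.drop_succ_cons, List.map_append]
    exact fun a _ => by omega

theorem pvClosI_cons5 (t : List Char) (m : Nat) :
    pvClosI ('5' :: t) (m + 1) = 0 :: (pvClosI t m).map (· + 1) := by
  simp only [pvClosI, pvScan35_cons5_zero]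
  simp [List.drop_succ_cons]

theorem pvClosI_skip (c : Char) (t : List Char) (m : Nat)
    (h3 : c ≠ '3') (h4 : c ≠ '4') (h5 : c ≠ '5') :
    pvClosI (c :: t) m = (pvClosI t m).map (· + 1) := by
  cases m with
  | zero => simp [pvClosI_zero]
  | succ m =>
    rcases hS : pvScan35 t 0 with ⟨E2, o2⟩
    have e := pvScan35_cons_skip c t 0 h3 h5 (fun hx => h4 hx.1)
    rw [hS] at e
    cases o2 with
    | none => simp only [pvClosI, e, hS, pvSh, Option.map_none]
    | some j2 =>
      simp only [pvClosI, e, hS, pvSh, Option.map_some]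
      simp [List.map_map, Function.comp_def, List.drop_succ_cons, List.map_append]
      exact fun a _ => by omega

theorem pvClosW_cons7 (t : List Char) (j : Nat) (h : pvScan78 t 0 = some j) (w : Nat) :
    pvClosW ('7' :: t) w = (pvClosW (t.drop (j + 1)) w).map (· + (j + 2)) := by
  cases w with
  | zero => simp [pvClosW_zero]
  | succ w =>
    have e7 := pvScan78_head t j h
    cases hS : pvScan78 (t.drop (j + 1)) 0 with
    | none => rw [hS] at e7; simp only [pvClosW, e7, hS, Option.map_none]; simp
    | some j2 =>
      rw [hS] at e7
      simp only [pvClosW, e7, hS, Option.map_some]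
      simp [List.map_map, Function.comp_def, List.drop_drop, List.drop_succ_cons]
      rw [show j2 + (j + 2) = j + 1 + (j2 + 1) by omega]
      exact List.map_congr_left (fun a _ => by omega)

theorem pvClosW_cons8 (t : List Char) (w : Nat) :
    pvClosW ('8' :: t) (w + 1) = 0 :: (pvClosW t w).map (· + 1) := by
  simp only [pvClosW, pvScan78_cons8_zero]
  simp [List.drop_succ_cons]

theorem pvClosW_skip (c : Char) (t : List Char) (w : Nat) (h7 : c ≠ '7') (h8 : c ≠ '8') :
    pvClosW (c :: t) w = (pvClosW t w).map (· + 1) := by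
  cases w with
  | zero => simp [pvClosW_zero]
  | succ w =>
    have e := pvScan78_cons_skip c t 0 h7 h8
    cases hS : pvScan78 t 0 with
    | none => rw [hS] at e; simp only [pvClosW, e, hS, Option.map_none]; simp
    | some j2 =>
      rw [hS] at e
      simp only [pvClosW, e, hS, Option.map_some]
      simp [List.map_map, Function.comp_def, List.drop_succ_cons]
      exact fun a _ => by omega

theorem pvReqI_cons3 (t : List Char) (E : List Nat) (j : Nat)
    (h : pvScan35 t 0 = (E, some j)) (fl : List Bool) :
    pvReqI ('3' :: t) fl ↔ pvReqI (t.drop (j + 1)) fl := by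
  cases fl with
  | nil => simp [pvReqI]
  | cons b r =>
    rcases hS : pvScan35 (t.drop (j + 1)) 0 with ⟨E2, o2⟩
    have e3 := pvScan35_head t E j h
    rw [hS] at e3
    cases o2 with
    | none => simp only [pvReqI, e3, hS, Option.map_none]
    | some j2 =>
      simp only [pvReqI, e3, hS, Option.map_some]
      simp [List.drop_drop, List.drop_succ_cons]
      rw [show j2 + (j + 2) = j + 1 + (j2 + 1) by omega]
      exact fun _ => Iff.rfl

theorem pvReqI_cons4 (t : List Char) (b : Bool) (fl : List Bool) :
    pvReqI ('4' :: t) (b :: fl) ↔ pvReqI t (true :: fl) := by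
  rcases hS : pvScan35 t 0 with ⟨E2, o2⟩
  have e4 : pvScan35 ('4' :: t) 0 = (0 :: E2.map (· + 1), o2.map (· + 1)) := by
    rw [pvScan35_cons4_zero, hS]
  cases o2 with
  | none => simp only [pvReqI, e4, hS, Option.map_none]
  | some j2 =>
    simp only [pvReqI, e4, hS, Option.map_some]
    simp [List.drop_succ_cons]

theorem pvReqI_cons5 (t : List Char) (b : Bool) (fl : List Bool) :
    pvReqI ('5' :: t) (b :: fl) ↔ b = true ∧ pvReqI t fl := by
  simp only [pvReqI, pvScan35_cons5_zero]
  simp [List.drop_succ_cons]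

theorem pvReqI_skip (c : Char) (t : List Char) (fl : List Bool)
    (h3 : c ≠ '3') (h4 : c ≠ '4') (h5 : c ≠ '5') :
    pvReqI (c :: t) fl ↔ pvReqI t fl := by
  cases fl with
  | nil => simp [pvReqI]
  | cons b r =>
    rcases hS : pvScan35 t 0 with ⟨E2, o2⟩
    have e := pvScan35_cons_skip c t 0 h3 h5 (fun hx => h4 hx.1)
    rw [hS] at e
    cases o2 with
    | none => simp only [pvReqI, e, hS, pvSh, Option.map_none]
    | some j2 =>
      simp only [pvReqI, e, hS, pvSh, Option.map_some]
      simp [List.drop_succ_cons]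

theorem pvReqW_cons7 (t : List Char) (j : Nat) (h : pvScan78 t 0 = some j) (w : Nat) :
    pvReqW ('7' :: t) w ↔ pvReqW (t.drop (j + 1)) w := by
  cases w with
  | zero => simp [pvReqW_zero]
  | succ w =>
    have e7 := pvScan78_head t j h
    cases hS : pvScan78 (t.drop (j + 1)) 0 with
    | none => rw [hS] at e7; simp only [pvReqW, e7, hS, Option.map_none]
    | some j2 =>
      rw [hS] at e7
      simp only [pvReqW, e7, hS, Option.map_some]
      simp [List.drop_drop, List.drop_succ_cons]
      rw [show j2 + (j + 2) = j + 1 + (j2 + 1) by omega]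

theorem pvReqW_cons8 (t : List Char) (w : Nat) :
    pvReqW ('8' :: t) (w + 1) ↔ pvReqW t w := by
  simp only [pvReqW, pvScan78_cons8_zero]
  simp [List.drop_succ_cons]

theorem pvReqW_skip (c : Char) (t : List Char) (w : Nat) (h7 : c ≠ '7') (h8 : c ≠ '8') :
    pvReqW (c :: t) w ↔ pvReqW t w := by
  cases w with
  | zero => simp [pvReqW_zero]
  | succ w =>
    have e := pvScan78_cons_skip c t 0 h7 h8
    cases hS : pvScan78 t 0 with
    | none => rw [hS] at e; simp only [pvReqW, e, hS, Option.map_none]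
    | some j2 =>
      rw [hS] at e
      simp only [pvReqW, e, hS, Option.map_some]
      simp [List.drop_succ_cons]

-- a position 0 closer forces the matching head character
theorem pvClosI_pos (c : Char) (t : List Char) (m : Nat) (h4 : c ≠ '4') (h5 : c ≠ '5') :
    ∀ p ∈ pvClosI (c :: t) m, 0 < p := by
  by_cases h3 : c = '3'
  · subst h3
    cases m with
    | zero => simp [pvClosI_zero]
    | succ m =>
      rcases hS : pvScan35 t 0 with ⟨E2, o2⟩
      cases o2 with
      | some j =>
        rw [pvClosI_cons3 t E2 j hS]
        intro p hp
        simp at hp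
        omega
      | none =>
        have e := pvScan35_head_none t E2 hS
        simp only [pvClosI, e]
        simp
  · rw [pvClosI_skip c t m h3 h4 h5]
    intro p hp
    simp at hp
    omega

theorem pvClosW_pos (c : Char) (t : List Char) (w : Nat) (h8 : c ≠ '8') :
    ∀ p ∈ pvClosW (c :: t) w, 0 < p := by
  by_cases h7 : c = '7'
  · subst h7
    cases w with
    | zero => simp [pvClosW_zero]
    | succ w =>
      cases hS : pvScan78 t 0 with
      | some j =>
        rw [pvClosW_cons7 t j hS]
        intro p hp
        simp at hp
        omega
      | none =>
        have e := pvScan78_head_none t hS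
        simp only [pvClosW, e]
        simp
  · rw [pvClosW_skip c t w h7 h8]
    intro p hp
    simp at hp
    omega

-- definitional unfolds (given the head scan result)
theorem pvClosI_succ_eq (f : List Char) (m : Nat) (E : List Nat) (j : Nat)
    (h : pvScan35 f 0 = (E, some j)) :
    pvClosI f (m + 1) = E ++ j :: (pvClosI (f.drop (j + 1)) m).map (· + (j + 1)) := by
  simp only [pvClosI, h]

theorem pvClosW_succ_eq (f : List Char) (w : Nat) (j : Nat) (h : pvScan78 f 0 = some j) :
    pvClosW f (w + 1) = j :: (pvClosW (f.drop (j + 1)) w).map (· + (j + 1)) := by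
  simp only [pvClosW, h]

theorem pvReqI_cons_eq (f : List Char) (b : Bool) (fl : List Bool) (E : List Nat) (j : Nat)
    (h : pvScan35 f 0 = (E, some j)) :
    pvReqI f (b :: fl) ↔ (b = true ∨ E ≠ []) ∧ pvReqI (f.drop (j + 1)) fl := by
  simp only [pvReqI, h]

theorem pvReqI_cons_none (f : List Char) (b : Bool) (fl : List Bool) (E : List Nat)
    (h : pvScan35 f 0 = (E, none)) : ¬ pvReqI f (b :: fl) := by
  simp only [pvReqI, h]
  exact fun h => h

theorem pvReqW_succ_eq (f : List Char) (w : Nat) (j : Nat) (h : pvScan78 f 0 = some j) :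
    pvReqW f (w + 1) ↔ pvReqW (f.drop (j + 1)) w := by
  simp only [pvReqW, h]

theorem pvReqW_succ_none (f : List Char) (w : Nat) (h : pvScan78 f 0 = none) :
    ¬ pvReqW f (w + 1) := by
  simp only [pvReqW, h]
  exact fun h => h

-- ---- A's inner loops compute exactly the pure scans ----
theorem pvEnumFrom_cons (k : Nat) (c : Char) (t : List Char) :
    pvEnumFrom k (c :: t) = (k, c) :: pvEnumFrom (k + 1) t := rfl

theorem pvIfScanA_spec : ∀ (t : List Char) (k : Nat) (d : Int) (fe : Bool) (C : List Nat),
    pvIfScanA (pvEnumFrom k t) fe false d C =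
      match pvScan35 t d with
      | (E, some j) =>
          if fe = true ∨ E ≠ [] then some (true, true, C ++ E.map (· + k) ++ [k + j]) else none
      | (E, none) => some ((fe || !E.isEmpty), false, C ++ E.map (· + k))
  | [], k, d, fe, C => by simp [pvEnumFrom, pvIfScanA, pvScan35]
  | c :: t, k, d, fe, C => by
    rw [pvEnumFrom_cons]
    by_cases h3 : c = '3'
    · subst h3
      rw [show pvIfScanA ((k, '3') :: pvEnumFrom (k + 1) t) fe false d C
            = pvIfScanA (pvEnumFrom (k + 1) t) fe false (d + 1) C from by simp [pvIfScanA],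
          pvIfScanA_spec t (k + 1) (d + 1) fe C, pvScan35_cons3]
      rcases hS : pvScan35 t (d + 1) with ⟨E, o⟩
      cases o with
      | none =>
        simp [pvSh, List.map_map, Function.comp_def, Nat.add_assoc]
        exact fun _ _ => by omega
      | some j =>
        by_cases hfe : fe = true ∨ E ≠ []
        · have hfe' : fe = true ∨ E.map (· + 1) ≠ [] := by
            rcases hfe with h | h
            · exact Or.inl h
            · exact Or.inr (by simpa using h)
          simp only [pvSh, if_pos hfe, Option.map_some, if_pos hfe']
          simp [List.map_map, Function.comp_def, Nat.add_assoc]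
          constructor
          · exact fun _ _ => by omega
          · omega
        · have hfe' : ¬(fe = true ∨ E.map (· + 1) ≠ []) := by
            intro h; apply hfe
            rcases h with h | h
            · exact Or.inl h
            · exact Or.inr (by simpa using h)
          simp only [pvSh, if_neg hfe, Option.map_some, if_neg hfe']
    · by_cases h5 : c = '5'
      · subst h5
        by_cases hd0 : d = 0
        · subst hd0
          rw [show pvIfScanA ((k, '5') :: pvEnumFrom (k + 1) t) fe false 0 C
                = (if fe = false then none else some (fe, true, C ++ [k])) from by
              simp [pvIfScanA], pvScan35_cons5_zero]
          cases fe <;> simp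
        · rw [show pvIfScanA ((k, '5') :: pvEnumFrom (k + 1) t) fe false d C
                = pvIfScanA (pvEnumFrom (k + 1) t) fe false (d - 1) C from by
              simp [pvIfScanA, hd0], pvIfScanA_spec t (k + 1) (d - 1) fe C,
              pvScan35_cons5_ne t d hd0]
          rcases hS : pvScan35 t (d - 1) with ⟨E, o⟩
          cases o with
          | none =>
            simp [pvSh, List.map_map, Function.comp_def, Nat.add_assoc]
            exact fun _ _ => by omega
          | some j =>
            by_cases hfe : fe = true ∨ E ≠ []
            · have hfe' : fe = true ∨ E.map (· + 1) ≠ [] := by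
                rcases hfe with h | h
                · exact Or.inl h
                · exact Or.inr (by simpa using h)
              simp only [pvSh, if_pos hfe, Option.map_some, if_pos hfe']
              simp [List.map_map, Function.comp_def, Nat.add_assoc]
              constructor
              · exact fun _ _ => by omega
              · omega
            · have hfe' : ¬(fe = true ∨ E.map (· + 1) ≠ []) := by
                intro h; apply hfe
                rcases h with h | h
                · exact Or.inl h
                · exact Or.inr (by simpa using h)
              simp only [pvSh, if_neg hfe, Option.map_some, if_neg hfe']
      · by_cases h4 : c = '4' ∧ d = 0
        · obtain ⟨hc, hd0⟩ := h4; subst hc; subst hd0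
          rw [show pvIfScanA ((k, '4') :: pvEnumFrom (k + 1) t) fe false 0 C
                = pvIfScanA (pvEnumFrom (k + 1) t) true false 0 (C ++ [k]) from by
              simp [pvIfScanA], pvIfScanA_spec t (k + 1) 0 true (C ++ [k]),
              pvScan35_cons4_zero]
          rcases hS : pvScan35 t 0 with ⟨E, o⟩
          cases o with
          | none =>
            simp [List.map_map, Function.comp_def, Nat.add_assoc]
            exact fun _ _ => by omega
          | some j =>
            have h1 : (true = true ∨ E ≠ []) := Or.inl rfl
            have h2 : (fe = true ∨ (0 :: E.map (· + 1)) ≠ []) := Or.inr (by simp)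
            simp only [Option.map_some, if_pos h1, if_pos h2]
            simp [List.map_map, Function.comp_def, Nat.add_assoc]
            constructor
            · exact fun _ _ => by omega
            · omega
        · rw [show pvIfScanA ((k, c) :: pvEnumFrom (k + 1) t) fe false d C
                = pvIfScanA (pvEnumFrom (k + 1) t) fe false d C from by
              simp [pvIfScanA, h3, h4, h5], pvIfScanA_spec t (k + 1) d fe C,
              pvScan35_cons_skip c t d h3 h5 h4]
          rcases hS : pvScan35 t d with ⟨E, o⟩
          cases o with
          | none =>
            simp [pvSh, List.map_map, Function.comp_def, Nat.add_assoc]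
            exact fun _ _ => by omega
          | some j =>
            by_cases hfe : fe = true ∨ E ≠ []
            · have hfe' : fe = true ∨ E.map (· + 1) ≠ [] := by
                rcases hfe with h | h
                · exact Or.inl h
                · exact Or.inr (by simpa using h)
              simp only [pvSh, if_pos hfe, Option.map_some, if_pos hfe']
              simp [List.map_map, Function.comp_def, Nat.add_assoc]
              constructor
              · exact fun _ _ => by omega
              · omega
            · have hfe' : ¬(fe = true ∨ E.map (· + 1) ≠ []) := by
                intro h; apply hfe
                rcases h with h | h
                · exact Or.inl h
                · exact Or.inr (by simpa using h)
              simp only [pvSh, if_neg hfe, Option.map_some, if_neg hfe']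
  termination_by t => t.length

theorem pvWhileScanA_spec : ∀ (t : List Char) (k : Nat) (d : Int) (fw : Bool) (C : List Nat),
    pvWhileScanA (pvEnumFrom k t) d fw C =
      match pvScan78 t d with
      | some j => (true, C ++ [k + j])
      | none => (fw, C)
  | [], k, d, fw, C => by simp [pvEnumFrom, pvWhileScanA, pvScan78]
  | c :: t, k, d, fw, C => by
    rw [pvEnumFrom_cons]
    by_cases h7 : c = '7'
    · subst h7
      rw [show pvWhileScanA ((k, '7') :: pvEnumFrom (k + 1) t) d fw C
            = pvWhileScanA (pvEnumFrom (k + 1) t) (d + 1) fw C from by simp [pvWhileScanA],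
          pvWhileScanA_spec t (k + 1) (d + 1) fw C, pvScan78_cons7]
      cases hS : pvScan78 t (d + 1) with
      | none => simp
      | some j => simp; omega
    · by_cases h8 : c = '8'
      · subst h8
        by_cases hd0 : d = 0
        · subst hd0
          rw [show pvWhileScanA ((k, '8') :: pvEnumFrom (k + 1) t) 0 fw C
                = (true, C ++ [k]) from by simp [pvWhileScanA], pvScan78_cons8_zero]
          simp
        · rw [show pvWhileScanA ((k, '8') :: pvEnumFrom (k + 1) t) d fw C
                = pvWhileScanA (pvEnumFrom (k + 1) t) (d - 1) fw C from by
              simp [pvWhileScanA, hd0], pvWhileScanA_spec t (k + 1) (d - 1) fw C,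
              pvScan78_cons8_ne t d hd0]
          cases hS : pvScan78 t (d - 1) with
          | none => simp
          | some j => simp; omega
      · rw [show pvWhileScanA ((k, c) :: pvEnumFrom (k + 1) t) d fw C
              = pvWhileScanA (pvEnumFrom (k + 1) t) d fw C from by
            simp [pvWhileScanA, h7, h8], pvWhileScanA_spec t (k + 1) d fw C,
            pvScan78_cons_skip c t d h7 h8]
        cases hS : pvScan78 t d with
        | none => simp
        | some j => simp; omega
  termination_by t => t.length

-- ---- the machine components accept only when every open frame is properly closed ----
theorem pvRunI_accept : ∀ (u : List Char) (st : List Bool), pvRunI u st = true → pvReqI u st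
  | [], st, h => by
    cases st with
    | nil => trivial
    | cons b r => simp [pvRunI] at h
  | c :: u, st, h => by
    by_cases h3 : c = '3'
    · subst h3
      rw [show pvRunI ('3' :: u) st = pvRunI u (false :: st) from by simp [pvRunI]] at h
      have hr := pvRunI_accept u (false :: st) h
      rcases hS : pvScan35 u 0 with ⟨E, o⟩
      cases o with
      | none => exact absurd hr (pvReqI_cons_none u false st E hS)
      | some j =>
        rw [pvReqI_cons_eq u false st E j hS] at hr
        rw [pvReqI_cons3 u E j hS]
        exact hr.2
    · by_cases h4 : c = '4'
      · subst h4
        cases st with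
        | nil => simp [pvRunI] at h
        | cons b r =>
          rw [show pvRunI ('4' :: u) (b :: r) = pvRunI u (true :: r) from by simp [pvRunI]] at h
          rw [pvReqI_cons4]
          exact pvRunI_accept u (true :: r) h
      · by_cases h5 : c = '5'
        · subst h5
          cases st with
          | nil => simp [pvRunI] at h
          | cons b r =>
            cases b with
            | false => simp [pvRunI] at h
            | true =>
              rw [show pvRunI ('5' :: u) (true :: r) = pvRunI u r from by simp [pvRunI]] at h
              rw [pvReqI_cons5]
              exact ⟨rfl, pvRunI_accept u r h⟩
        · rw [show pvRunI (c :: u) st = pvRunI u st from by simp [pvRunI, h3, h4, h5]] at h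
          rw [pvReqI_skip c u st h3 h4 h5]
          exact pvRunI_accept u st h

theorem pvRunW_accept : ∀ (u : List Char) (w : Nat), pvRunW u w = true → pvReqW u w
  | [], w, h => by
    cases w with
    | zero => trivial
    | succ v => simp [pvRunW] at h
  | c :: u, w, h => by
    by_cases h7 : c = '7'
    · subst h7
      rw [show pvRunW ('7' :: u) w = pvRunW u (w + 1) from by simp [pvRunW]] at h
      have hr := pvRunW_accept u (w + 1) h
      cases hS : pvScan78 u 0 with
      | none => exact absurd hr (pvReqW_succ_none u w hS)
      | some j =>
        rw [pvReqW_succ_eq u w j hS] at hr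
        rw [pvReqW_cons7 u j hS]
        exact hr
    · by_cases h8 : c = '8'
      · subst h8
        cases w with
        | zero => simp [pvRunW] at h
        | succ v =>
          rw [show pvRunW ('8' :: u) (v + 1) = pvRunW u v from by simp [pvRunW]] at h
          rw [pvReqW_cons8]
          exact pvRunW_accept u v h
      · rw [show pvRunW (c :: u) w = pvRunW u w from by simp [pvRunW, h7, h8]] at h
        rw [pvReqW_skip c u w h7 h8]
        exact pvRunW_accept u w h

-- ---- membership arithmetic helpers ----
theorem pvMemShift1 (X : List Nat) (p : Nat) : (1 + p) ∈ X.map (· + 1) ↔ p ∈ X := by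
  simp only [List.mem_map]
  constructor
  · rintro ⟨a, ha, e⟩
    have : a = p := by omega
    exact this ▸ ha
  · intro h; exact ⟨p, h, by omega⟩

theorem pvMemZeroShift1 (X : List Nat) (p : Nat) : (1 + p) ∈ 0 :: X.map (· + 1) ↔ p ∈ X := by
  rw [List.mem_cons]
  rw [pvMemShift1]
  constructor
  · rintro (h | h)
    · omega
    · exact h
  · exact Or.inr

theorem pvMemShiftJ (X : List Nat) (p j : Nat) :
    (1 + p) ∈ X.map (· + (j + 2)) ↔ ∃ q ∈ X, p = q + (j + 1) := by
  simp only [List.mem_map]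
  constructor
  · rintro ⟨a, ha, e⟩; exact ⟨a, ha, by omega⟩
  · rintro ⟨a, ha, e⟩; exact ⟨a, ha, by omega⟩

-- ---- the main induction: A's outer sweep equals B's one-pass machine ----
theorem pvMain : ∀ (f : List Char) (k : Nat) (C : List Nat) (st : List Bool) (w : Nat),
    (∀ c ∈ f, c ∈ pvOps) →
    (∀ p : Nat, (k + p) ∈ C ↔ (p ∈ pvClosI f st.length ∨ p ∈ pvClosW f w)) →
    pvReqI f st → pvReqW f w →
    pvOuterA (pvEnumFrom k f) C = (pvRunI f st && pvRunW f w)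
  | [], k, C, st, w, hchars, H1, H2, H3 => by
    have hst : st = [] := pvReqI_nil_iff [] st H2 rfl
    subst hst
    cases w with
    | zero => simp [pvEnumFrom, pvOuterA, pvRunI, pvRunW]
    | succ v => simp [pvReqW, pvScan78] at H3
  | c :: f, k, C, st, w, hchars, H1, H2, H3 => by
    have hc := hchars c List.mem_cons_self
    have hchars' : ∀ c' ∈ f, c' ∈ pvOps := fun c' h => hchars c' (List.mem_cons_of_mem _ h)
    rw [pvEnumFrom_cons]
    simp only [pvOps, List.mem_cons, List.not_mem_nil, or_false] at hc
    rcases hc with hc | hc | hc | hc | hc <;> subst hc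
    -- case '3'
    · rw [show pvOuterA ((k, '3') :: pvEnumFrom (k + 1) f) C
            = (match pvIfScanA (pvEnumFrom (k + 1) f) false false 0 C with
               | none => false
               | some (fe, fend, C') =>
                   if fe = false ∨ fend = false then false else pvOuterA (pvEnumFrom (k + 1) f) C')
            from by simp [pvOuterA],
          pvIfScanA_spec f (k + 1) 0 false C,
          show pvRunI ('3' :: f) st = pvRunI f (false :: st) from by simp [pvRunI]]
      rcases hS : pvScan35 f 0 with ⟨E, o⟩
      cases o with
      | none =>
        have hRF : pvRunI f (false :: st) = false := by
          cases hR : pvRunI f (false :: st) with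
          | false => rfl
          | true => exact absurd (pvRunI_accept f (false :: st) hR) (pvReqI_cons_none f false st E hS)
        simp [hRF]
      | some j =>
        by_cases hE : E = []
        · subst hE
          have hcond : ¬((false : Bool) = true ∨ ([] : List Nat) ≠ []) := by simp
          simp only [if_neg hcond]
          have hRF : pvRunI f (false :: st) = false := by
            cases hR : pvRunI f (false :: st) with
            | false => rfl
            | true =>
              have := pvRunI_accept f (false :: st) hR
              rw [pvReqI_cons_eq f false st [] j hS] at this
              simpa using this.1
          simp [hRF]
        · have hcond : ((false : Bool) = true ∨ E ≠ []) := Or.inr hE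
          simp only [if_pos hcond]
          have hmatch : ¬((true : Bool) = false ∨ (true : Bool) = false) := by simp
          simp only [if_neg hmatch]
          -- invariant for the recursive call
          have H2' : pvReqI f (false :: st) := by
            rw [pvReqI_cons_eq f false st E j hS]
            refine ⟨Or.inr hE, ?_⟩
            rw [pvReqI_cons3 f E j hS] at H2
            exact H2
          have H3' : pvReqW f w := by
            rw [pvReqW_skip '3' f w (by decide) (by decide)] at H3
            exact H3
          have H1' : ∀ p : Nat, (k + 1 + p) ∈ (C ++ E.map (· + (k + 1)) ++ [k + 1 + j]) ↔
              (p ∈ pvClosI f (false :: st).length ∨ p ∈ pvClosW f w) := by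
            intro p
            have harr := H1 (1 + p)
            rw [show k + (1 + p) = k + 1 + p from by omega,
                pvClosI_cons3 f E j hS, pvClosW_skip '3' f w (by decide) (by decide),
                pvMemShiftJ, pvMemShift1] at harr
            rw [show (false :: st).length = st.length + 1 from rfl,
                pvClosI_succ_eq f st.length E j hS]
            simp only [List.mem_append, List.mem_map, List.mem_cons, List.not_mem_nil, or_false]
            constructor
            · rintro ((hC | ⟨a, ha, e⟩) | hlast)
              · rcases harr.mp hC with ⟨q, hq, e⟩ | hY
                · exact Or.inl (Or.inr (Or.inr ⟨q, hq, by omega⟩))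
                · exact Or.inr hY
              · have : a = p := by omega
                exact Or.inl (Or.inl (this ▸ ha))
              · exact Or.inl (Or.inr (Or.inl (by omega)))
            · rintro ((hEp | hj | ⟨q, hq, e⟩) | hY)
              · exact Or.inl (Or.inr ⟨p, hEp, by omega⟩)
              · exact Or.inr (by omega)
              · exact Or.inl (Or.inl (harr.mpr (Or.inl ⟨q, hq, by omega⟩)))
              · exact Or.inl (Or.inl (harr.mpr (Or.inr hY)))
          exact pvMain f (k + 1) (C ++ E.map (· + (k + 1)) ++ [k + 1 + j]) (false :: st) w
            hchars' H1' H2' H3'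
    -- case '4'
    · rw [show pvOuterA ((k, '4') :: pvEnumFrom (k + 1) f) C
            = (if k ∈ C then pvOuterA (pvEnumFrom (k + 1) f) C else false) from by simp [pvOuterA]]
      have hk := H1 0
      rw [Nat.add_zero] at hk
      have hW0 : (0 : Nat) ∉ pvClosW ('4' :: f) w := fun h =>
        absurd (pvClosW_pos '4' f w (by decide) 0 h) (by omega)
      cases st with
      | nil =>
        have hkC : k ∉ C := fun h => by
          rcases hk.mp h with hI | hW
          · simp [pvClosI_zero] at hI
          · exact hW0 hW
        rw [if_neg hkC]
        simp [pvRunI]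
      | cons b r =>
        have hkC : k ∈ C := hk.mpr (Or.inl (by
          rw [show (b :: r).length = r.length + 1 from rfl, pvClosI_cons4]
          exact List.mem_cons_self))
        rw [if_pos hkC,
            show pvRunI ('4' :: f) (b :: r) = pvRunI f (true :: r) from by simp [pvRunI]]
        have H2' : pvReqI f (true :: r) := (pvReqI_cons4 f b r).mp H2
        have H3' : pvReqW f w := (pvReqW_skip '4' f w (by decide) (by decide)).mp H3
        have H1' : ∀ p : Nat, (k + 1 + p) ∈ C ↔
            (p ∈ pvClosI f (true :: r).length ∨ p ∈ pvClosW f w) := by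
          intro p
          have harr := H1 (1 + p)
          rw [show k + (1 + p) = k + 1 + p from by omega,
              show (b :: r).length = r.length + 1 from rfl,
              pvClosI_cons4, pvClosW_skip '4' f w (by decide) (by decide),
              pvMemZeroShift1, pvMemShift1] at harr
          exact harr
        exact pvMain f (k + 1) C (true :: r) w hchars' H1' H2' H3'
    -- case '5'
    · rw [show pvOuterA ((k, '5') :: pvEnumFrom (k + 1) f) C
            = (if k ∈ C then pvOuterA (pvEnumFrom (k + 1) f) C else false) from by simp [pvOuterA]]
      have hk := H1 0
      rw [Nat.add_zero] at hk
      have hW0 : (0 : Nat) ∉ pvClosW ('5' :: f) w := fun h =>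
        absurd (pvClosW_pos '5' f w (by decide) 0 h) (by omega)
      cases st with
      | nil =>
        have hkC : k ∉ C := fun h => by
          rcases hk.mp h with hI | hW
          · simp [pvClosI_zero] at hI
          · exact hW0 hW
        rw [if_neg hkC]
        simp [pvRunI]
      | cons b r =>
        have hb := (pvReqI_cons5 f b r).mp H2
        have hbt : b = true := hb.1
        subst hbt
        have hkC : k ∈ C := hk.mpr (Or.inl (by
          rw [show (true :: r).length = r.length + 1 from rfl, pvClosI_cons5]
          exact List.mem_cons_self))
        rw [if_pos hkC,
            show pvRunI ('5' :: f) (true :: r) = pvRunI f r from by simp [pvRunI]]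
        have H3' : pvReqW f w := (pvReqW_skip '5' f w (by decide) (by decide)).mp H3
        have H1' : ∀ p : Nat, (k + 1 + p) ∈ C ↔
            (p ∈ pvClosI f r.length ∨ p ∈ pvClosW f w) := by
          intro p
          have harr := H1 (1 + p)
          rw [show k + (1 + p) = k + 1 + p from by omega,
              show (true :: r).length = r.length + 1 from rfl,
              pvClosI_cons5, pvClosW_skip '5' f w (by decide) (by decide),
              pvMemZeroShift1, pvMemShift1] at harr
          exact harr
        exact pvMain f (k + 1) C r w hchars' H1' hb.2 H3'
    -- case '7'
    · rw [show pvOuterA ((k, '7') :: pvEnumFrom (k + 1) f) C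
            = (match pvWhileScanA (pvEnumFrom (k + 1) f) 0 false C with
               | (fw, C') => if fw = false then false else pvOuterA (pvEnumFrom (k + 1) f) C')
            from by simp [pvOuterA],
          pvWhileScanA_spec f (k + 1) 0 false C,
          show pvRunI ('7' :: f) st = pvRunI f st from by simp [pvRunI],
          show pvRunW ('7' :: f) w = pvRunW f (w + 1) from by simp [pvRunW]]
      cases hS : pvScan78 f 0 with
      | none =>
        have hRF : pvRunW f (w + 1) = false := by
          cases hR : pvRunW f (w + 1) with
          | false => rfl
          | true => exact absurd (pvRunW_accept f (w + 1) hR) (pvReqW_succ_none f w hS)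
        simp [hRF]
      | some j =>
        have H2' : pvReqI f st := (pvReqI_skip '7' f st (by decide) (by decide) (by decide)).mp H2
        have H3' : pvReqW f (w + 1) := by
          rw [pvReqW_succ_eq f w j hS]
          exact (pvReqW_cons7 f j hS w).mp H3
        have H1' : ∀ p : Nat, (k + 1 + p) ∈ (C ++ [k + 1 + j]) ↔
            (p ∈ pvClosI f st.length ∨ p ∈ pvClosW f (w + 1)) := by
          intro p
          have harr := H1 (1 + p)
          rw [show k + (1 + p) = k + 1 + p from by omega,
              pvClosI_skip '7' f st.length (by decide) (by decide) (by decide),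
              pvClosW_cons7 f j hS w, pvMemShift1, pvMemShiftJ] at harr
          rw [pvClosW_succ_eq f w j hS]
          simp only [List.mem_append, List.mem_map, List.mem_cons, List.not_mem_nil, or_false]
          constructor
          · rintro (hC | hlast)
            · rcases harr.mp hC with hX | ⟨q, hq, e⟩
              · exact Or.inl hX
              · exact Or.inr (Or.inr ⟨q, hq, by omega⟩)
            · exact Or.inr (Or.inl (by omega))
          · rintro (hX | hj | ⟨q, hq, e⟩)
            · exact Or.inl (harr.mpr (Or.inl hX))
            · exact Or.inr (by omega)
            · exact Or.inl (harr.mpr (Or.inr ⟨q, hq, by omega⟩))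
        exact pvMain f (k + 1) (C ++ [k + 1 + j]) st (w + 1) hchars' H1' H2' H3'
    -- case '8'
    · rw [show pvOuterA ((k, '8') :: pvEnumFrom (k + 1) f) C
            = (if k ∈ C then pvOuterA (pvEnumFrom (k + 1) f) C else false) from by simp [pvOuterA],
          show pvRunI ('8' :: f) st = pvRunI f st from by simp [pvRunI]]
      have hk := H1 0
      rw [Nat.add_zero] at hk
      have hI0 : (0 : Nat) ∉ pvClosI ('8' :: f) st.length := fun h =>
        absurd (pvClosI_pos '8' f st.length (by decide) (by decide) 0 h) (by omega)
      cases w with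
      | zero =>
        have hkC : k ∉ C := fun h => by
          rcases hk.mp h with hI | hW
          · exact hI0 hI
          · simp [pvClosW_zero] at hW
        rw [if_neg hkC]
        simp [pvRunW]
      | succ v =>
        have hkC : k ∈ C := hk.mpr (Or.inr (by
          rw [pvClosW_cons8]
          exact List.mem_cons_self))
        rw [if_pos hkC,
            show pvRunW ('8' :: f) (v + 1) = pvRunW f v from by simp [pvRunW]]
        have H2' : pvReqI f st := (pvReqI_skip '8' f st (by decide) (by decide) (by decide)).mp H2
        have H3' : pvReqW f v := (pvReqW_cons8 f v).mp H3
        have H1' : ∀ p : Nat, (k + 1 + p) ∈ C ↔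
            (p ∈ pvClosI f st.length ∨ p ∈ pvClosW f v) := by
          intro p
          have harr := H1 (1 + p)
          rw [show k + (1 + p) = k + 1 + p from by omega,
              pvClosI_skip '8' f st.length (by decide) (by decide) (by decide),
              pvClosW_cons8, pvMemShift1, pvMemZeroShift1] at harr
          exact harr
        exact pvMain f (k + 1) C st v hchars' H1' H2' H3'

-- ---- bridging the string level: format list and B's single pass ----
theorem pvToListOfListSingleton (x : Char) : (String.ofList [x]).toList = [x] := by
  simp

theorem pvSW_nil (x : Char) : PySem.Chars.startswith [] [x] = false := by
  simp [PySem.Chars.startswith, List.isPrefixOf]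

theorem pvSW_cons (a : Char) (r : List Char) (x : Char) :
    PySem.Chars.startswith (a :: r) [x] = (x == a) := by
  cases hax : x == a with
  | true => simp_all [PySem.Chars.startswith, List.isPrefixOf]
  | false => simp_all [PySem.Chars.startswith, List.isPrefixOf]

theorem pvHeadChar (op : String) (a : Char) (r : List Char) (h : op.toList = a :: r) :
    (PySem.Str.pyGet? op 0).getD ' ' = a := by
  simp [PySem.Str.pyGet?, PySem.Chars.pyGet?, PySem.List.pyGet?, PySem.List.pyIdx?, h]

theorem pv34578 : "34578".toList = ['3', '4', '5', '7', '8'] := by decide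

theorem pvFormatA_cons_nil (op : String) (t : List String) (h : op.toList = []) :
    pvFormatA (op :: t) = pvFormatA t := by
  unfold pvFormatA
  rw [List.filter_cons, if_neg (by
    rw [pv34578]
    simp [List.any_cons, h, pvSW_nil])]

theorem pvFormatA_cons_mem (op : String) (t : List String) (a : Char) (r : List Char)
    (h : op.toList = a :: r) (ha : a ∈ pvOps) :
    pvFormatA (op :: t) = a :: pvFormatA t := by
  unfold pvFormatA
  rw [List.filter_cons, if_pos (by
    rw [pv34578]
    simp only [List.any_cons, List.any_nil, PySem.Str.startswith_eq, h, pvSW_cons,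
      pvToListOfListSingleton]
    simp only [pvOps, List.mem_cons, List.not_mem_nil, or_false] at ha
    rcases ha with ha | ha | ha | ha | ha <;> subst ha <;> simp)]
  rw [List.map_cons, pvHeadChar op a r h]

theorem pvFormatA_cons_skip (op : String) (t : List String) (a : Char) (r : List Char)
    (h : op.toList = a :: r) (ha : a ∉ pvOps) :
    pvFormatA (op :: t) = pvFormatA t := by
  unfold pvFormatA
  rw [List.filter_cons, if_neg (by
    rw [pv34578]
    simp only [List.any_cons, List.any_nil, PySem.Str.startswith_eq, h, pvSW_cons,
      pvToListOfListSingleton]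
    simp only [pvOps, List.mem_cons, List.not_mem_nil, or_false] at ha
    push_neg at ha
    obtain ⟨h1, h2, h3, h4, h5⟩ := ha
    simp [beq_iff_eq]
    exact ⟨fun e => h1 e.symm, fun e => h2 e.symm, fun e => h3 e.symm,
      fun e => h4 e.symm, fun e => h5 e.symm⟩)]

theorem pvFormatA_mem : ∀ (l : List String), ∀ c ∈ pvFormatA l, c ∈ pvOps
  | [], c, hc => by simp [pvFormatA] at hc
  | op :: t, c, hc => by
    cases h : op.toList with
    | nil =>
      rw [pvFormatA_cons_nil op t h] at hc
      exact pvFormatA_mem t c hc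
    | cons a r =>
      by_cases ha : a ∈ pvOps
      · rw [pvFormatA_cons_mem op t a r h ha] at hc
        rcases List.mem_cons.mp hc with hc | hc
        · exact hc ▸ ha
        · exact pvFormatA_mem t c hc
      · rw [pvFormatA_cons_skip op t a r h ha] at hc
        exact pvFormatA_mem t c hc

theorem pvSlice1 (op : String) (a : Char) (r : List Char) (h : op.toList = a :: r) :
    PySem.Str.slice op none (some 1) = String.ofList [a] := by
  apply String.toList_inj.mp
  rw [PySem.Str.toList_slice, PySem.Chars.slice_eq_listSlice, h,
      PySem.List.slice_to (xs := a :: r) (b := 1) (by omega)]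
  simp

theorem pvSlice1_nil (op : String) (h : op.toList = []) :
    PySem.Str.slice op none (some 1) = "" := by
  apply String.toList_inj.mp
  rw [PySem.Str.toList_slice, PySem.Chars.slice_eq_listSlice, h,
      PySem.List.slice_to (xs := []) (b := 1) (by omega)]
  rfl

-- B's pass over the opcode strings is the two-component machine over the format chars
theorem pvRunB_eq : ∀ (l : List String) (st : List Bool) (w : Nat),
    pvRunB l st (w : Int) = (pvRunI (pvFormatA l) st && pvRunW (pvFormatA l) w)
  | [], st, w => by
    have hf : pvFormatA [] = [] := rfl
    rw [hf]
    show (st.isEmpty && ((w : Int) == 0)) = (st.isEmpty && (w == 0))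
    cases w with
    | zero => rfl
    | succ v =>
      have h1 : (((v + 1 : Nat) : Int) == 0) = false := by
        rw [beq_eq_false_iff_ne]
        omega
      have h2 : ((v + 1 : Nat) == 0) = false := by
        rw [beq_eq_false_iff_ne]
        omega
      rw [h1, h2]
  | op :: t, st, w => by
    cases h : op.toList with
    | nil =>
      rw [pvFormatA_cons_nil op t h,
          show pvRunB (op :: t) st (w : Int) = pvRunB t st (w : Int) from by
            simp [pvRunB, pvSlice1_nil op h]]
      exact pvRunB_eq t st w
    | cons a r =>
      have hs := pvSlice1 op a r h
      by_cases h3 : a = '3'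
      · subst h3
        rw [pvFormatA_cons_mem op t '3' r h (by decide),
            show pvRunB (op :: t) st (w : Int) = pvRunB t (false :: st) (w : Int) from by
              simp [pvRunB, hs],
            show pvRunI ('3' :: pvFormatA t) st = pvRunI (pvFormatA t) (false :: st) from by
              simp [pvRunI],
            show pvRunW ('3' :: pvFormatA t) w = pvRunW (pvFormatA t) w from by simp [pvRunW]]
        exact pvRunB_eq t (false :: st) w
      · by_cases h4 : a = '4'
        · subst h4
          rw [pvFormatA_cons_mem op t '4' r h (by decide)]
          cases st with
          | nil =>
            rw [show pvRunB (op :: t) [] (w : Int) = false from by simp [pvRunB, hs]]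
            simp [pvRunI]
          | cons b rs =>
            rw [show pvRunB (op :: t) (b :: rs) (w : Int) = pvRunB t (true :: rs) (w : Int)
                  from by simp [pvRunB, hs],
                show pvRunI ('4' :: pvFormatA t) (b :: rs) = pvRunI (pvFormatA t) (true :: rs)
                  from by simp [pvRunI],
                show pvRunW ('4' :: pvFormatA t) w = pvRunW (pvFormatA t) w from by
                  simp [pvRunW]]
            exact pvRunB_eq t (true :: rs) w
        · by_cases h5 : a = '5'
          · subst h5
            rw [pvFormatA_cons_mem op t '5' r h (by decide)]
            cases st with
            | nil =>
              rw [show pvRunB (op :: t) [] (w : Int) = false from by simp [pvRunB, hs]]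
              simp [pvRunI]
            | cons b rs =>
              cases b with
              | false =>
                rw [show pvRunB (op :: t) (false :: rs) (w : Int) = false from by
                      simp [pvRunB, hs]]
                simp [pvRunI]
              | true =>
                rw [show pvRunB (op :: t) (true :: rs) (w : Int) = pvRunB t rs (w : Int)
                      from by simp [pvRunB, hs],
                    show pvRunI ('5' :: pvFormatA t) (true :: rs) = pvRunI (pvFormatA t) rs
                      from by simp [pvRunI],
                    show pvRunW ('5' :: pvFormatA t) w = pvRunW (pvFormatA t) w from by
                      simp [pvRunW]]
                exact pvRunB_eq t rs w
          · by_cases h7 : a = '7'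
            · subst h7
              rw [pvFormatA_cons_mem op t '7' r h (by decide),
                  show pvRunB (op :: t) st (w : Int) = pvRunB t st ((w : Int) + 1) from by
                    simp [pvRunB, hs],
                  show pvRunI ('7' :: pvFormatA t) st = pvRunI (pvFormatA t) st from by
                    simp [pvRunI],
                  show pvRunW ('7' :: pvFormatA t) w = pvRunW (pvFormatA t) (w + 1) from by
                    simp [pvRunW],
                  show ((w : Int) + 1) = ((w + 1 : Nat) : Int) from by push_cast; ring]
              exact pvRunB_eq t st (w + 1)
            · by_cases h8 : a = '8'
              · subst h8
                rw [pvFormatA_cons_mem op t '8' r h (by decide)]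
                cases w with
                | zero =>
                  rw [show pvRunB (op :: t) st ((0 : Nat) : Int) = false from by
                        simp [pvRunB, hs]]
                  simp [pvRunW]
                | succ v =>
                  rw [show pvRunB (op :: t) st ((v + 1 : Nat) : Int)
                        = pvRunB t st (((v + 1 : Nat) : Int) - 1) from by
                        simp [pvRunB, hs]
                        omega,
                      show (((v + 1 : Nat) : Int) - 1) = ((v : Nat) : Int) from by push_cast; ring,
                      show pvRunI ('8' :: pvFormatA t) st = pvRunI (pvFormatA t) st from by
                        simp [pvRunI],
                      show pvRunW ('8' :: pvFormatA t) (v + 1) = pvRunW (pvFormatA t) v from by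
                        simp [pvRunW]]
                  exact pvRunB_eq t st v
              · have ha : a ∉ pvOps := by simp [pvOps, h3, h4, h5, h7, h8]
                rw [pvFormatA_cons_skip op t a r h ha,
                    show pvRunB (op :: t) st (w : Int) = pvRunB t st (w : Int) from by
                      have e3 : PySem.Str.slice op none (some 1) ≠ "3" := by
                        rw [hs]; intro e
                        exact h3 (by simpa using String.toList_inj.mpr e)
                      have e4 : PySem.Str.slice op none (some 1) ≠ "4" := by
                        rw [hs]; intro e
                        exact h4 (by simpa using String.toList_inj.mpr e)
                      have e5 : PySem.Str.slice op none (some 1) ≠ "5" := by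
                        rw [hs]; intro e
                        exact h5 (by simpa using String.toList_inj.mpr e)
                      have e7 : PySem.Str.slice op none (some 1) ≠ "7" := by
                        rw [hs]; intro e
                        exact h7 (by simpa using String.toList_inj.mpr e)
                      have e8 : PySem.Str.slice op none (some 1) ≠ "8" := by
                        rw [hs]; intro e
                        exact h8 (by simpa using String.toList_inj.mpr e)
                      simp [pvRunB, e3, e4, e5, e7, e8]]
                exact pvRunB_eq t st w

-- ===== VERDICT (by name: the statement is the Claim_ definition above) =====
theorem checker_O2_spec : Claim_equal_checker_O2 := by
  unfold Claim_equal_checker_O2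
  intro l _
  unfold Spec_checker_O2 checker_O2 checker_O2_alt
  rw [pvMain (pvFormatA l) 0 [] [] 0 (pvFormatA_mem l)
        (by intro p; simp [pvClosI_zero, pvClosW_zero]) trivial trivial,
      show (0 : Int) = ((0 : Nat) : Int) from rfl,
      pvRunB_eq l [] 0]
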